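-- pv_equiv track=rewrite | github.com/unitn-sml/CAN | src/polygons_floor/polygons_generator_only_rows.py | incompatible_polygons
-- ===== SOURCE A (Python) =====
-- from itertools import combinations, product, islice
--
-- def incompatible_polygons(polygons):
--     def overlap(pol1, pol2):
--         return any(pixel in pol2 for pixel in pol1)
--
--     def touch(pol1, pol2):
--         return any(abs(p1[0] - p2[0]) <= 1 and abs(p1[1] - p2[1]) <= 1
--                    for p1, p2 in product(pol1, pol2))
--
--     def incompatible(pol1, pol2):
--         return overlap(pol1, pol2) or touch(pol1, pol2)
--
--     return any(incompatible(c[0], c[1]) for c in combinations(polygons, 2))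
-- ===== SOURCE B (Python) =====
-- def incompatible_polygons(polygons):
--     seen = set()
--     for pol in polygons:
--         for (x, y) in pol:
--             for dx in (-1, 0, 1):
--                 for dy in (-1, 0, 1):
--                     if (x + dx, y + dy) in seen:
--                         return True
--         seen.update(pol)
--     return False
-- ===== Notes on version B (the rewrite author's own statement) =====
-- stated objective: faster
-- what changed: Replaced the all-pairs polygon comparison (every pixel of one polygon against every pixel of another) by a single pass that hashes already-seen pixels into a set and tests each new pixel's 3x3 neighborhood against it.
import Mathlib
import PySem

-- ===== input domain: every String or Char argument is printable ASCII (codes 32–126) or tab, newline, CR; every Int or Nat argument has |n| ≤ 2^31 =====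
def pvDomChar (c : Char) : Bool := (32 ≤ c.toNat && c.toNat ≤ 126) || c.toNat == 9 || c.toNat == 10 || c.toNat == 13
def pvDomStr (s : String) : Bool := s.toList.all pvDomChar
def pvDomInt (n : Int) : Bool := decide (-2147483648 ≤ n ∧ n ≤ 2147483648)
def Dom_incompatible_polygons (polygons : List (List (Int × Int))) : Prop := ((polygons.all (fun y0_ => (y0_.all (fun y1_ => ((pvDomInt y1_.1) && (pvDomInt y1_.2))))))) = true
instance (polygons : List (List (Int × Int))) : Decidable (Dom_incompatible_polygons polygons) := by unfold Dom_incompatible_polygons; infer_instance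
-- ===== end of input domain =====

-- B replaces A's all-pairs pixel comparison by one pass over a hash set of seen pixels
-- (9 neighborhood lookups per pixel): asymptotically faster, same return value.

-- ===== PORT A =====
-- combinations(polygons, 2), in itertools order
def pvPairs {α : Type} : List α → List (α × α)
  | [] => []
  | x :: rest => rest.map (fun y => (x, y)) ++ pvPairs rest

def pvOverlap (pol1 pol2 : List (Int × Int)) : Bool :=
  pol1.any (fun pixel => pol2.contains pixel)

def pvTouch (pol1 pol2 : List (Int × Int)) : Bool :=
  pol1.any (fun p1 => pol2.any (fun p2 =>
    decide ((p1.1 - p2.1).natAbs ≤ 1 ∧ (p1.2 - p2.2).natAbs ≤ 1)))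

def pvIncompatible (pol1 pol2 : List (Int × Int)) : Bool :=
  pvOverlap pol1 pol2 || pvTouch pol1 pol2

def incompatible_polygons (polygons : List (List (Int × Int))) : Bool :=
  (pvPairs polygons).any (fun c => pvIncompatible c.1 c.2)

-- ===== PORT B =====
def pvOffsets : List (Int × Int) :=
  [(-1,-1),(-1,0),(-1,1),(0,-1),(0,0),(0,1),(1,-1),(1,0),(1,1)]

def pvCheckPol (seen : PySem.Set (Int × Int)) (pol : List (Int × Int)) : Bool :=
  pol.any (fun p => pvOffsets.any (fun d =>
    PySem.Set.contains seen (p.1 + d.1, p.2 + d.2)))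

def pvBAux (seen : PySem.Set (Int × Int)) : List (List (Int × Int)) → Bool
  | [] => false
  | pol :: rest =>
      if pvCheckPol seen pol then true
      else pvBAux (PySem.Set.update seen pol) rest

def incompatible_polygons_alt (polygons : List (List (Int × Int))) : Bool :=
  pvBAux PySem.Set.empty polygons

-- ===== PRECONDITION & SPEC =====
def Spec_incompatible_polygons (polygons : List (List (Int × Int))) (out : Bool) : Prop := out = incompatible_polygons_alt polygons
instance (polygons : List (List (Int × Int))) (out : Bool) : Decidable (Spec_incompatible_polygons polygons out) := by unfold Spec_incompatible_polygons; infer_instance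

-- ===== CLAIM (what is proved, stated in full; the proofs are below) =====
def Claim_equal_incompatible_polygons : Prop := ∀ (polygons : List (List (Int × Int))), Dom_incompatible_polygons polygons → Spec_incompatible_polygons polygons (incompatible_polygons polygons)

-- ===== LEMMAS AND PROOFS =====

-- two pixel lists hold pixels at Chebyshev distance ≤ 1
def pvClose (pol1 pol2 : List (Int × Int)) : Prop :=
  ∃ p ∈ pol1, ∃ q ∈ pol2, (p.1 - q.1).natAbs ≤ 1 ∧ (p.2 - q.2).natAbs ≤ 1

lemma pvClose_comm (pol1 pol2 : List (Int × Int)) : pvClose pol1 pol2 ↔ pvClose pol2 pol1 := by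
  constructor <;>
    (rintro ⟨p, hp, q, hq, h1, h2⟩; exact ⟨q, hq, p, hp, by omega, by omega⟩)

lemma pvIncompatible_iff (pol1 pol2 : List (Int × Int)) :
    pvIncompatible pol1 pol2 = true ↔ pvClose pol1 pol2 := by
  simp only [pvIncompatible, pvOverlap, pvTouch, Bool.or_eq_true, List.any_eq_true,
    List.contains_iff_mem, decide_eq_true_eq, pvClose]
  constructor
  · rintro (⟨p, hp, hpq⟩ | ⟨p, hp, q, hq, h⟩)
    · exact ⟨p, hp, p, hpq, by simp⟩
    · exact ⟨p, hp, q, hq, h⟩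
  · rintro ⟨p, hp, q, hq, h⟩
    exact Or.inr ⟨p, hp, q, hq, h⟩

lemma pvA_iff (polys : List (List (Int × Int))) :
    incompatible_polygons polys = true ↔ ∃ c ∈ pvPairs polys, pvClose c.1 c.2 := by
  simp only [incompatible_polygons, List.any_eq_true]
  exact exists_congr fun c => and_congr_right fun _ => pvIncompatible_iff c.1 c.2

lemma pvMem_offsets (a b : Int) (ha : a.natAbs ≤ 1) (hb : b.natAbs ≤ 1) :
    (a, b) ∈ pvOffsets := by
  have h1 : a = -1 ∨ a = 0 ∨ a = 1 := by omega
  have h2 : b = -1 ∨ b = 0 ∨ b = 1 := by omega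
  rcases h1 with h | h | h <;> rcases h2 with h' | h' | h' <;> subst h <;> subst h' <;> decide

lemma pvCheckPol_iff (seen : PySem.Set (Int × Int)) (pol : List (Int × Int)) :
    pvCheckPol seen pol = true ↔ pvClose pol seen := by
  simp only [pvCheckPol, List.any_eq_true, PySem.Set.contains_eq_listContains,
    List.contains_iff_mem, pvClose]
  constructor
  · rintro ⟨p, hp, d, hd, hmem⟩
    have hd1 : d.1.natAbs ≤ 1 ∧ d.2.natAbs ≤ 1 := by fin_cases hd <;> simp
    exact ⟨p, hp, (p.1 + d.1, p.2 + d.2), hmem, by omega, by omega⟩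
  · rintro ⟨p, hp, q, hq, h1, h2⟩
    refine ⟨p, hp, (q.1 - p.1, q.2 - p.2), pvMem_offsets _ _ (by omega) (by omega), ?_⟩
    have : (p.1 + (q.1 - p.1), p.2 + (q.2 - p.2)) = q := by
      cases q; simp
    rw [this]; exact hq

lemma pvClose_update (r : List (Int × Int)) (seen : PySem.Set (Int × Int))
    (pol : List (Int × Int)) :
    pvClose r (PySem.Set.update seen pol) ↔ pvClose r seen ∨ pvClose r pol := by
  simp only [pvClose, PySem.Set.mem_update]
  constructor
  · rintro ⟨p, hp, q, hq | hq, h⟩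
    · exact Or.inl ⟨p, hp, q, hq, h⟩
    · exact Or.inr ⟨p, hp, q, hq, h⟩
  · rintro (⟨p, hp, q, hq, h⟩ | ⟨p, hp, q, hq, h⟩)
    · exact ⟨p, hp, q, Or.inl hq, h⟩
    · exact ⟨p, hp, q, Or.inr hq, h⟩

lemma pvBAux_iff (polys : List (List (Int × Int))) (seen : PySem.Set (Int × Int)) :
    pvBAux seen polys = true ↔
      (∃ pol ∈ polys, pvClose pol seen) ∨ ∃ c ∈ pvPairs polys, pvClose c.1 c.2 := by
  induction polys generalizing seen with
  | nil => simp [pvBAux, pvPairs]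
  | cons pol rest ih =>
    simp only [pvBAux]
    by_cases h : pvCheckPol seen pol = true
    · simp only [h, if_true, true_iff]
      exact Or.inl ⟨pol, List.mem_cons_self .., (pvCheckPol_iff seen pol).mp h⟩
    · rw [if_neg h, ih]
      have hnc : ¬ pvClose pol seen := fun hc => h ((pvCheckPol_iff seen pol).mpr hc)
      constructor
      · rintro (⟨r, hr, hc⟩ | hp)
        · rcases (pvClose_update r seen pol).mp hc with hc | hc
          · exact Or.inl ⟨r, List.mem_cons_of_mem _ hr, hc⟩
          · refine Or.inr ⟨(pol, r), ?_, (pvClose_comm r pol).mp hc⟩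
            simp only [pvPairs, List.mem_append, List.mem_map]
            exact Or.inl ⟨r, hr, rfl⟩
        · rcases hp with ⟨c, hc, hcl⟩
          refine Or.inr ⟨c, ?_, hcl⟩
          simp [pvPairs, hc]
      · rintro (⟨r, hr, hc⟩ | ⟨c, hc, hcl⟩)
        · rcases List.mem_cons.mp hr with rfl | hr
          · exact absurd hc hnc
          · exact Or.inl ⟨r, hr, (pvClose_update r seen pol).mpr (Or.inl hc)⟩
        · simp only [pvPairs, List.mem_append, List.mem_map] at hc
          rcases hc with ⟨y, hy, rfl⟩ | hc
          · exact Or.inl ⟨y, hy, (pvClose_update y seen pol).mpr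
              (Or.inr ((pvClose_comm pol y).mp hcl))⟩
          · exact Or.inr ⟨c, hc, hcl⟩

-- ===== VERDICT (by name: the statement is the Claim_ definition above) =====
theorem incompatible_polygons_spec : Claim_equal_incompatible_polygons := by
  intro polys _
  show incompatible_polygons polys = incompatible_polygons_alt polys
  rw [Bool.eq_iff_iff, pvA_iff, incompatible_polygons_alt, pvBAux_iff]
  simp [PySem.Set.empty, pvClose]
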